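-- pv_equiv track=rewrite | github.com/MrIsaar/MachineLearning | playground.py | loopmid
-- ===== SOURCE A (Python) =====
-- def createArray(size,zero=False,transposed = False):
--     arr = []
--     if transposed:
--         for i in range(0,size):
--             arrinner = []
--             for j in range(0,size):
--                 if zero:
--                     arrinner.append(0)
--                 else:
--                     arrinner.append(j + i+1)
--             arr.append(arrinner)
--         return arr
--     for i in range(0,size):
--         arrinner = []
--         for j in range(0,size):
--             if zero:
--                 arrinner.append(0)
--             else:
--                 arrinner.append(j + i+1)
--         arr.append(arrinner)
--     return arr
--
-- def loopmid(size=512):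
--
--     a = createArray(size)
--     b = createArray(size,transposed=True)
--     c = createArray(size,True)
--
--     for i in range(0,size):
--         for k in range(i,size):
--             for j in range(0,size):
--              #i = val,k occurs val  0,1 1,2 2,3
--                 c[i][j] += a[i][k]*b[k][j]
--     return c
-- ===== SOURCE B (Python) =====
-- def loopmid(size=512):
--     # O(n^2): per row, sum-of-k and sum-of-k^2 accumulators make each cell
--     # an affine function of the column index; no matrix mutation at all.
--     n = size
--     rows = []
--     for i in range(n):
--         t1 = 0
--         t2 = 0
--         for k in range(i, n):
--             t1 += k
--             t2 += k * k
--         base = t2 + (i + 2) * t1 + (n - i) * (i + 1)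
--         slope = t1 + (n - i) * (i + 1)
--         rows.append([base + j * slope for j in range(n)])
--     return rows
-- ===== Notes on version B (the rewrite author's own statement) =====
-- stated objective: faster
-- what changed: A multiplies two formulaic matrices with a triple loop over a mutable zero matrix; B never builds matrices: per row it accumulates sum(k) and sum(k^2) over k in [i,n) once and fills each cell in O(1) as an affine function base+j*slope of the column index.
import Mathlib
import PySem

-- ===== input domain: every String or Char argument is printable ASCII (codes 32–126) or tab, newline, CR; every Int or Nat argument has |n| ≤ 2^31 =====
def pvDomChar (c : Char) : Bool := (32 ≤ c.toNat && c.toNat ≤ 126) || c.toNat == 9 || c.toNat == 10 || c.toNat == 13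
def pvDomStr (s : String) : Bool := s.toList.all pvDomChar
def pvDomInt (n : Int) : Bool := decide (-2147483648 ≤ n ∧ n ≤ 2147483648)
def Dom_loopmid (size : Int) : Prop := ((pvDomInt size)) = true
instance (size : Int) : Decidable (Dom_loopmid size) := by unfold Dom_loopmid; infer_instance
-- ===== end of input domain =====

-- B replaces A's O(n^3) triple-loop matrix product with an O(n^2) per-row
-- sum-of-k / sum-of-k^2 computation (each cell is affine in the column index).

-- ===== PORT A =====
def createArray (size : Int) (zero : Bool) (transposed : Bool) : List (List Int) :=
  if transposed then
    (PySem.List.pyRange 0 size 1).foldl (fun arr i =>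
      arr ++ [(PySem.List.pyRange 0 size 1).foldl (fun arrinner j =>
        arrinner ++ [if zero then (0 : Int) else j + i + 1]) []]) []
  else
    (PySem.List.pyRange 0 size 1).foldl (fun arr i =>
      arr ++ [(PySem.List.pyRange 0 size 1).foldl (fun arrinner j =>
        arrinner ++ [if zero then (0 : Int) else j + i + 1]) []]) []

def loopmid (size : Int) : List (List Int) :=
  let a := createArray size false false
  let b := createArray size false true
  let c := createArray size true false
  (PySem.List.pyRange 0 size 1).foldl (fun c i =>
    (PySem.List.pyRange i size 1).foldl (fun c k =>
      (PySem.List.pyRange 0 size 1).foldl (fun c j =>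
        -- c[i][j] += a[i][k]*b[k][j]; here 0 ≤ i,j,k < size always, so the
        -- pyGetD reads and the List.modify write at i.toNat/j.toNat are exact
        c.modify i.toNat (fun row => row.modify j.toNat (fun x =>
          x + PySem.List.pyGetD (PySem.List.pyGetD a i []) k 0 *
              PySem.List.pyGetD (PySem.List.pyGetD b k []) j 0))) c) c) c

-- ===== PORT B =====
def loopmid_alt (size : Int) : List (List Int) :=
  let n := size
  (PySem.List.pyRange 0 n 1).foldl (fun rows i =>
    let t := (PySem.List.pyRange i n 1).foldl
      (fun (t : Int × Int) k => (t.1 + k, t.2 + k * k)) (0, 0)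
    let base := t.2 + (i + 2) * t.1 + (n - i) * (i + 1)
    let slope := t.1 + (n - i) * (i + 1)
    rows ++ [(PySem.List.pyRange 0 n 1).map (fun j => base + j * slope)]) []

-- ===== PRECONDITION & SPEC =====
def Spec_loopmid (size : Int) (out : List (List Int)) : Prop := out = loopmid_alt size
instance (size : Int) (out : List (List Int)) : Decidable (Spec_loopmid size out) := by unfold Spec_loopmid; infer_instance

-- ===== CLAIM (what is proved, stated in full; the proofs are below) =====
def Claim_equal_loopmid : Prop := ∀ (size : Int), Dom_loopmid size → Spec_loopmid size (loopmid size)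

-- ===== LEMMAS AND PROOFS =====

-- the common value of every cell: c[m][q] = Σ_{k=m}^{n-1} (k+m+1)*(q+k+1)
def pvScell (n m q : ℕ) : Int :=
  ((PySem.List.pyRange (↑m) (↑n) 1).map (fun k => (k + ↑m + 1) * ((↑q : Int) + k + 1))).sum

def pvMat (n : ℕ) : List (List Int) :=
  (PySem.List.pyRange 0 (↑n) 1).map (fun i => (PySem.List.pyRange 0 (↑n) 1).map (fun j => j + i + 1))

lemma pv_flatten_singleton {α β : Type} (f : α → β) (l : List α) :
    (l.map (fun x => [f x])).flatten = l.map f := by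
  induction l with
  | nil => rfl
  | cons x l ih => simp [ih]

lemma createArray_false (size : Int) (t : Bool) :
    createArray size false t =
      (PySem.List.pyRange 0 size 1).map (fun i => (PySem.List.pyRange 0 size 1).map (fun j => j + i + 1)) := by
  unfold createArray
  cases t <;> simp [PySem.List.foldl_append_singleton_eq_map, pv_flatten_singleton]

lemma createArray_true (size : Int) (t : Bool) :
    createArray size true t =
      (PySem.List.pyRange 0 size 1).map (fun _ => (PySem.List.pyRange 0 size 1).map (fun _ => (0 : Int))) := by
  unfold createArray
  cases t <;> simp [PySem.List.foldl_append_singleton_eq_map, pv_flatten_singleton]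

lemma pv_modify_modify {α : Type} (l : List α) (i : Nat) (f g : α → α) :
    (l.modify i f).modify i g = l.modify i (fun x => g (f x)) := by
  apply List.ext_getElem?
  intro j
  simp only [List.getElem?_modify]
  cases l[j]? <;> simp <;> split_ifs <;> simp

lemma pv_modify_id {α : Type} (l : List α) (i : Nat) : l.modify i (fun x => x) = l := by
  apply List.ext_getElem?
  intro j
  simp only [List.getElem?_modify]
  cases l[j]? <;> simp

lemma pv_foldl_modify_hoist {α β : Type} (L : List β) (i : Nat) (f : β → α → α) (c : List α) :
    L.foldl (fun c e => c.modify i (f e)) c = c.modify i (fun r => L.foldl (fun r e => f e r) r) := by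
  induction L generalizing c with
  | nil => simp [pv_modify_id]
  | cons e L ih => simp only [List.foldl_cons]; rw [ih, pv_modify_modify]

lemma pv_get_foldl_modify {α : Type} (h : Nat → α → α) (L : List Nat) (hN : L.Nodup)
    (cs : List α) (m : Nat) :
    (L.foldl (fun cs i => cs.modify i (h i)) cs)[m]? =
      if m ∈ L then Option.map (h m) (cs[m]?) else cs[m]? := by
  induction L generalizing cs with
  | nil => simp
  | cons i L ih =>
    rcases List.nodup_cons.mp hN with ⟨hiL, hL⟩
    rw [List.foldl_cons, ih hL]
    by_cases hm : m ∈ L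
    · have hne : i ≠ m := fun e => hiL (e ▸ hm)
      simp only [hm, if_pos, List.mem_cons, or_true, if_true, List.getElem?_modify]
      cases cs[m]? <;> simp [hne]
    · by_cases him : m = i
      · subst him
        simp only [hm, if_false, List.mem_cons, true_or, if_true, List.getElem?_modify, hm]
        cases cs[m]? <;> simp
      · have hne : i ≠ m := fun e => him e.symm
        have hmc : m ∉ i :: L := by
          intro hx
          rcases List.mem_cons.mp hx with h1 | h2
          · exact him h1
          · exact hm h2
        rw [if_neg hm, if_neg hmc, List.getElem?_modify]
        cases hcm : cs[m]? with
        | none => rfl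
        | some x => simp [hne]

lemma pv_length_jfold (w : Nat → Int) :
    ∀ (r : List Int) (L : List Nat),
      (L.foldl (fun r j => r.modify j (fun x => x + w j)) r).length = r.length := by
  intro r L
  induction L generalizing r with
  | nil => rfl
  | cons j L ih => simp only [List.foldl_cons]; rw [ih, List.length_modify]

lemma pv_rowFold (nJ : Nat) (w : Int → Nat → Int) (K : List Int) :
    ∀ (r : List Int), r.length = nJ → ∀ q : Nat,
      (K.foldl (fun r k =>
          (List.range nJ).foldl (fun r j => r.modify j (fun x => x + w k j)) r) r)[q]? =
        (r[q]?).map (fun x => x + (K.map (fun k => w k q)).sum) := by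
  induction K with
  | nil => intro r hr q; cases h : r[q]? <;> simp [h]
  | cons k K ih =>
    intro r hr q
    rw [List.foldl_cons]
    have hlen : ((List.range nJ).foldl (fun r j => r.modify j (fun x => x + w k j)) r).length = nJ := by
      rw [pv_length_jfold (fun j => w k j) r (List.range nJ)]; exact hr
    rw [ih _ hlen q]
    have hstep : ((List.range nJ).foldl (fun r j => r.modify j (fun x => x + w k j)) r)[q]? =
        if q ∈ List.range nJ then Option.map (fun x => x + w k q) (r[q]?) else r[q]? :=
      pv_get_foldl_modify (fun j x => x + w k j) (List.range nJ) List.nodup_range r q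
    rw [hstep]
    by_cases hq : q ∈ List.range nJ
    · rw [if_pos hq]
      cases h : r[q]? with
      | none => simp [h]
      | some x =>
        simp only [h, Option.map_some, List.map_cons, List.sum_cons, Option.some.injEq]
        ring
    · have hq' : r[q]? = none := by
        rw [List.getElem?_eq_none_iff, hr]
        rw [List.mem_range] at hq
        omega
      simp [hq, hq']

lemma pv_sum_poly (L : List Int) (a b : Int) :
    (L.map (fun k => (k + a + 1) * (b + k + 1))).sum =
      (L.map (fun k => k * k)).sum + (a + b + 2) * L.sum + (L.length : Int) * ((a + 1) * (b + 1)) := by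
  induction L with
  | nil => simp
  | cons k L ih =>
    simp only [List.map_cons, List.sum_cons, List.length_cons, ih]
    push_cast
    ring

lemma pv_w_eval (n m q : ℕ) (hm : m < n) (hq : q < n) (k : Int)
    (hk : k ∈ PySem.List.pyRange (↑m) (↑n) 1) :
    PySem.List.pyGetD (PySem.List.pyGetD (pvMat n) (↑m) []) k 0 *
      PySem.List.pyGetD (PySem.List.pyGetD (pvMat n) k []) (↑q) 0 =
      (k + ↑m + 1) * ((↑q : Int) + k + 1) := by
  obtain ⟨hk0, hkn⟩ := (PySem.List.mem_pyRange_one).mp hk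
  obtain ⟨k', rfl⟩ : ∃ k' : ℕ, k = (k' : Int) :=
    ⟨k.toNat, (Int.toNat_of_nonneg (le_trans (by exact_mod_cast Nat.zero_le m) hk0)).symm⟩
  have hk' : k' < n := by exact_mod_cast hkn
  unfold pvMat
  rw [PySem.List.pyGetD_map_pyRange _ n m _ hm]
  rw [PySem.List.pyGetD_map_pyRange _ n k' _ hk']
  rw [PySem.List.pyGetD_map_pyRange _ n k' _ hk']
  rw [PySem.List.pyGetD_map_pyRange _ n q _ hq]

lemma pv_row_eq (n m : ℕ) (hm : m < n) :
    (PySem.List.pyRange (↑m) (↑n) 1).foldl (fun r k =>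
        (List.range n).foldl (fun r j => r.modify j (fun x =>
          x + PySem.List.pyGetD (PySem.List.pyGetD (pvMat n) (↑m) []) k 0 *
              PySem.List.pyGetD (PySem.List.pyGetD (pvMat n) k []) (↑j) 0)) r)
      ((List.range n).map (fun _ => (0 : Int)))
    = (List.range n).map (fun q => pvScell n m q) := by
  apply List.ext_getElem?
  intro q
  rw [pv_rowFold n
      (fun k j => PySem.List.pyGetD (PySem.List.pyGetD (pvMat n) (↑m) []) k 0 *
        PySem.List.pyGetD (PySem.List.pyGetD (pvMat n) k []) (↑j) 0)
      _ _ (by simp) q]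
  by_cases hq : q < n
  · simp only [List.getElem?_map, List.getElem?_range, hq, if_pos, dif_pos, Option.map_some]
    have hcong : ((PySem.List.pyRange (↑m) (↑n) 1).map
        (fun k => PySem.List.pyGetD (PySem.List.pyGetD (pvMat n) (↑m) []) k 0 *
          PySem.List.pyGetD (PySem.List.pyGetD (pvMat n) k []) (↑q) 0)) =
        ((PySem.List.pyRange (↑m) (↑n) 1).map (fun k => (k + ↑m + 1) * ((↑q : Int) + k + 1))) :=
      List.map_congr_left (fun k hk => pv_w_eval n m q hm hq k hk)
    rw [hcong]
    simp [pvScell]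
  · have h1 : ((List.range n).map (fun _ => (0 : Int)))[q]? = none := by
      rw [List.getElem?_eq_none_iff]; simp; omega
    have h2 : ((List.range n).map (fun q => pvScell n m q))[q]? = none := by
      rw [List.getElem?_eq_none_iff]; simp; omega
    rw [h1, h2]
    rfl


lemma pv_body_hoist (n : ℕ) (c : List (List Int)) (i : Int) :
    (PySem.List.pyRange i (↑n) 1).foldl (fun c k =>
      (PySem.List.pyRange 0 (↑n) 1).foldl (fun c j =>
        c.modify i.toNat (fun row => row.modify j.toNat (fun x =>
          x + PySem.List.pyGetD (PySem.List.pyGetD (pvMat n) i []) k 0 *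
              PySem.List.pyGetD (PySem.List.pyGetD (pvMat n) k []) j 0))) c) c
    = c.modify i.toNat (fun r =>
        (PySem.List.pyRange i (↑n) 1).foldl (fun r k =>
          (PySem.List.pyRange 0 (↑n) 1).foldl (fun r j => r.modify j.toNat (fun x =>
            x + PySem.List.pyGetD (PySem.List.pyGetD (pvMat n) i []) k 0 *
                PySem.List.pyGetD (PySem.List.pyGetD (pvMat n) k []) j 0)) r) r) := by
  have h1 : ∀ (c' : List (List Int)) (k : Int), k ∈ PySem.List.pyRange i (↑n) 1 →
      (PySem.List.pyRange 0 (↑n) 1).foldl (fun c j =>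
        c.modify i.toNat (fun row => row.modify j.toNat (fun x =>
          x + PySem.List.pyGetD (PySem.List.pyGetD (pvMat n) i []) k 0 *
              PySem.List.pyGetD (PySem.List.pyGetD (pvMat n) k []) j 0))) c'
      = c'.modify i.toNat (fun r =>
          (PySem.List.pyRange 0 (↑n) 1).foldl (fun r j => r.modify j.toNat (fun x =>
            x + PySem.List.pyGetD (PySem.List.pyGetD (pvMat n) i []) k 0 *
                PySem.List.pyGetD (PySem.List.pyGetD (pvMat n) k []) j 0)) r) :=
    fun c' k _ => pv_foldl_modify_hoist (PySem.List.pyRange 0 (↑n) 1) i.toNat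
      (fun j row => row.modify j.toNat (fun x =>
        x + PySem.List.pyGetD (PySem.List.pyGetD (pvMat n) i []) k 0 *
            PySem.List.pyGetD (PySem.List.pyGetD (pvMat n) k []) j 0)) c'
  rw [PySem.List.foldl_congr_mem _ _ _ _ h1]
  exact pv_foldl_modify_hoist (PySem.List.pyRange i (↑n) 1) i.toNat
    (fun k r =>
      (PySem.List.pyRange 0 (↑n) 1).foldl (fun r j => r.modify j.toNat (fun x =>
        x + PySem.List.pyGetD (PySem.List.pyGetD (pvMat n) i []) k 0 *
            PySem.List.pyGetD (PySem.List.pyGetD (pvMat n) k []) j 0)) r) c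


lemma pv_outer (n p : ℕ) :
    ((List.range n).foldl (fun cs m => cs.modify m (fun r =>
        (PySem.List.pyRange (↑m) (↑n) 1).foldl (fun r k =>
          (List.range n).foldl (fun r j => r.modify j (fun x =>
            x + PySem.List.pyGetD (PySem.List.pyGetD (pvMat n) (↑m) []) k 0 *
                PySem.List.pyGetD (PySem.List.pyGetD (pvMat n) k []) (↑j) 0)) r) r))
      ((List.range n).map (fun _ => (List.range n).map (fun _ => (0 : Int)))))[p]? =
      if p ∈ List.range n then
        Option.map (fun r =>
          (PySem.List.pyRange (↑p) (↑n) 1).foldl (fun r k =>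
            (List.range n).foldl (fun r j => r.modify j (fun x =>
              x + PySem.List.pyGetD (PySem.List.pyGetD (pvMat n) (↑p) []) k 0 *
                  PySem.List.pyGetD (PySem.List.pyGetD (pvMat n) k []) (↑j) 0)) r) r)
          (((List.range n).map (fun _ => (List.range n).map (fun _ => (0 : Int))))[p]?)
      else ((List.range n).map (fun _ => (List.range n).map (fun _ => (0 : Int))))[p]? :=
  pv_get_foldl_modify
    (fun m r =>
      (PySem.List.pyRange (↑m) (↑n) 1).foldl (fun r k =>
        (List.range n).foldl (fun r j => r.modify j (fun x =>
          x + PySem.List.pyGetD (PySem.List.pyGetD (pvMat n) (↑m) []) k 0 *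
              PySem.List.pyGetD (PySem.List.pyGetD (pvMat n) k []) (↑j) 0)) r) r)
    (List.range n) List.nodup_range
    ((List.range n).map (fun _ => (List.range n).map (fun _ => (0 : Int)))) p

lemma pv_A_eq (n : ℕ) :
    loopmid (↑n) = (List.range n).map (fun m => (List.range n).map (fun q => pvScell n m q)) := by
  unfold loopmid
  simp only [createArray_false, createArray_true]
  rw [show ((PySem.List.pyRange 0 ((n : Int)) 1).map (fun i => (PySem.List.pyRange 0 ((n : Int)) 1).map (fun j => j + i + 1))) = pvMat n from rfl]
  refine Eq.trans (PySem.List.foldl_congr_mem _ _ _ _ (fun c i _ => pv_body_hoist n c i)) ?_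
  simp only [PySem.List.pyRange_zero_nat n, List.foldl_map, List.map_map, Int.toNat_natCast,
    Function.comp_def]
  apply List.ext_getElem?
  intro p
  rw [pv_outer n p]
  by_cases hp : p < n
  · rw [if_pos (List.mem_range.mpr hp)]
    have hC0 : ((List.range n).map (fun _ => (List.range n).map (fun _ => (0 : Int))))[p]? =
        some ((List.range n).map (fun _ => (0 : Int))) := by
      simp [List.getElem?_map, List.getElem?_range, hp]
    have hR : ((List.range n).map (fun m => (List.range n).map (fun q => pvScell n m q)))[p]? =
        some ((List.range n).map (fun q => pvScell n p q)) := by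
      simp [List.getElem?_map, List.getElem?_range, hp]
    rw [hC0, hR, Option.map_some]
    exact congrArg some (pv_row_eq n p hp)
  · rw [if_neg (by simpa [List.mem_range] using hp)]
    have h1 : ((List.range n).map (fun _ => (List.range n).map (fun _ => (0 : Int))))[p]? =
        (none : Option (List Int)) := by
      rw [List.getElem?_eq_none_iff]; simp; omega
    have h2 : ((List.range n).map (fun m => (List.range n).map (fun q => pvScell n m q)))[p]? =
        (none : Option (List Int)) := by
      rw [List.getElem?_eq_none_iff]; simp; omega
    rw [h1, h2]

lemma pv_B_eq (n : ℕ) :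
    loopmid_alt (↑n) = (List.range n).map (fun m => (List.range n).map (fun q => pvScell n m q)) := by
  simp only [loopmid_alt, PySem.List.foldl_append_singleton_eq_map, List.nil_append]
  rw [PySem.List.pyRange_zero_nat n]
  simp only [List.map_map, Function.comp_def]
  apply List.map_congr_left
  intro m hm
  have hm' : m < n := List.mem_range.mp hm
  apply List.map_congr_left
  intro q hq
  have hq' : q < n := List.mem_range.mp hq
  rw [PySem.List.foldl_prod_mk (f := fun a k => a + k) (g := fun a k => a + k * k)
      (l := PySem.List.pyRange (↑m) (↑n) 1) (a := 0) (b := 0)]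
  rw [PySem.List.foldl_add (PySem.List.pyRange (↑m) (↑n) 1) (fun k => k) 0]
  rw [PySem.List.foldl_add (PySem.List.pyRange (↑m) (↑n) 1) (fun k => k * k) 0]
  rw [pvScell, pv_sum_poly, PySem.List.length_pyRange_one]
  rw [Int.toNat_of_nonneg (by omega : (0 : Int) ≤ (↑n : Int) - ↑m)]
  simp only [List.map_id']
  ring

-- ===== VERDICT (by name: the statement is the Claim_ definition above) =====
theorem loopmid_spec : Claim_equal_loopmid := by
  intro size _
  unfold Spec_loopmid
  by_cases hs : 0 ≤ size
  · obtain ⟨n, rfl⟩ : ∃ n : ℕ, size = (n : Int) := ⟨size.toNat, (Int.toNat_of_nonneg hs).symm⟩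
    rw [pv_A_eq n, pv_B_eq n]
  · have h1 : PySem.List.pyRange 0 size 1 = [] := PySem.List.pyRange_one_eq_nil (by omega)
    simp [loopmid, loopmid_alt, createArray, h1]
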